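-- pv_equiv track=rewrite | github.com/jmmcd/GPDistance | python/RandomWalks/generate_trees.py | count_trees_of_given_shape
-- ===== SOURCE A (Python) =====
-- def count_trees_of_given_shape(t, vars, fns):
--     """Tree t is a string, eg (* (+ x y) y). This has n = 2 internal
--     nodes, m = 3 leaves. Number of trees of the same shape will be
--     4^n2^m (if there are 4 possibilities for internal nodes and 2 for
--     leaves)."""
--     def noccurrences(s1, s2):
--         """How many times do items in s2 occur in s1?"""
--         return sum(s1.count(a) for a in s2)
--     internal = vars
--     external = "".join(fns.keys())
--     n = noccurrences(t, internal)
--     m = noccurrences(t, external)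
--     return (len(internal)**n) * (len(external)**m)
-- ===== SOURCE B (Python) =====
-- def count_trees_of_given_shape(t, vars_, fns):
--     """Same result as A, by a sort-and-merge algorithm: sort t and each
--     alphabet, then a two-pointer run-merge over the two sorted lists adds
--     (run length in alphabet) * (run length in t) for every shared character,
--     which equals A's sum-with-multiplicity of per-character counts."""
--     external = "".join(fns.keys())
--     st = sorted(t)
--
--     def matches(alpha):
--         sa = sorted(alpha)
--         i = j = total = 0
--         while i < len(sa) and j < len(st):
--             a, b = sa[i], st[j]
--             if a < b:
--                 i += 1
--             elif b < a:
--                 j += 1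
--             else:
--                 i2 = i
--                 while i2 < len(sa) and sa[i2] == a:
--                     i2 += 1
--                 j2 = j
--                 while j2 < len(st) and st[j2] == a:
--                     j2 += 1
--                 total += (i2 - i) * (j2 - j)
--                 i, j = i2, j2
--         return total
--
--     n = matches(vars_)
--     m = matches(external)
--     return len(vars_) ** n * len(external) ** m
-- ===== Notes on version B (the rewrite author's own statement) =====
-- stated objective: alternative
-- what changed: Replaces the per-alphabet-character rescans of t (str.count) by a sort-and-merge algorithm: sort t and each alphabet once, then a single two-pointer pass over the two sorted lists adds run-length products for every shared character.
import Mathlib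
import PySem

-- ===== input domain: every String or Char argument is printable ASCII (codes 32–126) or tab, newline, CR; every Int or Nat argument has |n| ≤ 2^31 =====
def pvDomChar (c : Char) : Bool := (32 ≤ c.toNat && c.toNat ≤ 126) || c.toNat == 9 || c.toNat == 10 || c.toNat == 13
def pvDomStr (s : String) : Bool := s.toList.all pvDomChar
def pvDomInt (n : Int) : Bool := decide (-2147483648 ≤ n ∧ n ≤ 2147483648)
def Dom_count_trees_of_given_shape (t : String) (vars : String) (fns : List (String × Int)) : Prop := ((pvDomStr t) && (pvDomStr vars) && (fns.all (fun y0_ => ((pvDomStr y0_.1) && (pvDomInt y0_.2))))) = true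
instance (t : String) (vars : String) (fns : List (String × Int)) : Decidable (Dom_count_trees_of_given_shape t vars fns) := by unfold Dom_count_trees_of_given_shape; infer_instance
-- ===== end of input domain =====

-- B replaces A's per-alphabet-character rescans of t (str.count) by sort-and-merge:
-- sort t and each alphabet, then one two-pointer pass adding run-length products (objective: alternative).

-- ===== PORT A =====
-- s1.count(a) for a single-character a is exactly the character count, ported as List.count.
def count_trees_of_given_shape (t : String) (vars : String) (fns : List (String × Int)) : Int :=
  let internal : List Char := vars.toList
  let external : List Char := (fns.map (fun p => p.1.toList)).flatten  -- "".join(fns.keys())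
  let n : Nat := (internal.map (fun a => t.toList.count a)).sum        -- noccurrences(t, internal)
  let m : Nat := (external.map (fun a => t.toList.count a)).sum        -- noccurrences(t, external)
  ((internal.length : Int) ^ n) * ((external.length : Int) ^ m)

-- ===== PORT B =====
-- The two-pointer while loop of Source B's `matches`, as structural recursion on the two
-- sorted lists (advancing an index past a run = dropping the run off the front);
-- the inner run-scanning while loops are takeWhile/dropWhile of the run's character.
def pvMerge : List Char → List Char → Nat
  | [], _ => 0
  | _ :: _, [] => 0
  | a :: as, b :: bs =>
    if a < b then pvMerge as (b :: bs)
    else if b < a then pvMerge (a :: as) bs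
    else
      ((as.takeWhile (fun x => x = a)).length + 1) *
        ((bs.takeWhile (fun x => x = a)).length + 1) +
        pvMerge (as.dropWhile (fun x => x = a)) (bs.dropWhile (fun x => x = a))
termination_by s t => s.length + t.length
decreasing_by
  all_goals
    (have h1 := List.length_dropWhile_le (p := fun x => x = a) (l := as)
     have h2 := List.length_dropWhile_le (p := fun x => x = a) (l := bs)
     simp at h1 h2 ⊢ <;> omega)

def count_trees_of_given_shape_alt (t : String) (vars : String) (fns : List (String × Int)) : Int :=
  let external : List Char := (fns.map (fun p => p.1.toList)).flatten
  let st : List Char := PySem.List.sorted t.toList (fun x => x) false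
  let n : Nat := pvMerge (PySem.List.sorted vars.toList (fun x => x) false) st
  let m : Nat := pvMerge (PySem.List.sorted external (fun x => x) false) st
  ((vars.toList.length : Int) ^ n) * ((external.length : Int) ^ m)

-- ===== PRECONDITION & SPEC =====
def Spec_count_trees_of_given_shape (t : String) (vars : String) (fns : List (String × Int)) (out : Int) : Prop := out = count_trees_of_given_shape_alt t vars fns
instance (t : String) (vars : String) (fns : List (String × Int)) (out : Int) : Decidable (Spec_count_trees_of_given_shape t vars fns out) := by unfold Spec_count_trees_of_given_shape; infer_instance

-- ===== CLAIM (what is proved, stated in full; the proofs are below) =====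
def Claim_equal_count_trees_of_given_shape : Prop := ∀ (t : String) (vars : String) (fns : List (String × Int)), Dom_count_trees_of_given_shape t vars fns → Spec_count_trees_of_given_shape t vars fns (count_trees_of_given_shape t vars fns)

-- ===== LEMMAS AND PROOFS =====

-- elements left after dropping the leading run of a's in a sorted list are > a
theorem pv_dropWhile_gt (a : Char) (l : List Char) (hl : l.Pairwise (· ≤ ·))
    (hle : ∀ x ∈ l, a ≤ x) : ∀ x ∈ l.dropWhile (fun x => x = a), a < x := by
  induction l with
  | nil => simp
  | cons y ys ih =>
    by_cases hy : y = a
    · subst hy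
      simp only [List.dropWhile_cons, decide_true]
      exact ih hl.tail (fun x hx => hle x (List.mem_cons_of_mem _ hx))
    · have hys : List.dropWhile (fun x => decide (x = a)) (y :: ys) = y :: ys := by
        simp [hy]
      intro x hx
      rw [hys] at hx
      have hay : a < y := lt_of_le_of_ne (hle y (List.mem_cons_self)) (fun h => hy h.symm)
      rcases List.mem_cons.mp hx with h | h
      · exact h ▸ hay
      · exact lt_of_lt_of_le hay (List.rel_of_pairwise_cons hl h)

theorem pv_count_eq_zero_of_gt (a : Char) (l : List Char) (hgt : ∀ x ∈ l, a < x) :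
    l.count a = 0 :=
  List.count_eq_zero.mpr (fun h => lt_irrefl a (hgt a h))

-- On sorted inputs, the run-merge computes the sum over s of counts in t.
theorem pvMerge_eq_sum (s t : List Char) (hs : s.Pairwise (· ≤ ·)) (ht : t.Pairwise (· ≤ ·)) :
    pvMerge s t = (s.map (fun a => t.count a)).sum := by
  induction s, t using pvMerge.induct with
  | case1 t => simp [pvMerge]
  | case2 a as => simp [pvMerge]
  | case3 a as b bs hab ih =>
    rw [pvMerge, if_pos hab, ih hs.tail ht]
    have h0 : (b :: bs).count a = 0 := by
      apply pv_count_eq_zero_of_gt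
      intro x hx
      rcases List.mem_cons.mp hx with h | h
      · exact h ▸ hab
      · exact lt_of_lt_of_le hab (List.rel_of_pairwise_cons ht h)
    simp [h0]
  | case4 a as b bs hab hba ih =>
    rw [pvMerge, if_neg hab, if_pos hba, ih hs ht.tail]
    apply congrArg List.sum
    apply List.map_congr_left
    intro x hx
    have hbx : b < x := by
      rcases List.mem_cons.mp hx with h | h
      · exact h ▸ hba
      · exact lt_of_lt_of_le hba (List.rel_of_pairwise_cons hs h)
    simp [(ne_of_gt hbx).symm]
  | case5 a as b bs hab hba ih =>
    have hba' : b = a := le_antisymm (not_lt.mp hab) (not_lt.mp hba)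
    subst hba'
    rw [pvMerge, if_neg hab, if_neg hba]
    -- run decompositions
    have has : as.takeWhile (fun x => x = b) ++ as.dropWhile (fun x => x = b) = as :=
      List.takeWhile_append_dropWhile
    have hbs : bs.takeWhile (fun x => x = b) ++ bs.dropWhile (fun x => x = b) = bs :=
      List.takeWhile_append_dropWhile
    have hgt1 : ∀ x ∈ as.dropWhile (fun x => x = b), b < x :=
      pv_dropWhile_gt b as hs.tail (fun x hx => List.rel_of_pairwise_cons hs hx)
    have hgt2 : ∀ x ∈ bs.dropWhile (fun x => x = b), b < x :=
      pv_dropWhile_gt b bs ht.tail (fun x hx => List.rel_of_pairwise_cons ht hx)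
    have hp1 : ∀ x ∈ as.takeWhile (fun x => x = b), x = b := by
      intro x hx; simpa using List.mem_takeWhile_imp hx
    have hp2 : ∀ x ∈ bs.takeWhile (fun x => x = b), x = b := by
      intro x hx; simpa using List.mem_takeWhile_imp hx
    -- count of b in b::bs is 1 + length of bs's leading run
    have hcbs : bs.count b = (bs.takeWhile (fun x => x = b)).length := by
      conv_lhs => rw [← hbs]
      rw [List.count_append,
        List.count_eq_length.mpr (fun x hx => ((hp2 x hx) ▸ rfl : b = x)),
        pv_count_eq_zero_of_gt b _ hgt2]
      omega
    have hcb : (b :: bs).count b = (bs.takeWhile (fun x => x = b)).length + 1 := by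
      rw [List.count_cons_self, hcbs]
    -- count of any x from the residual run of s in b::bs reduces to the residual of t
    have hcr : ∀ x ∈ as.dropWhile (fun x => x = b),
        (b :: bs).count x = (bs.dropWhile (fun x => x = b)).count x := by
      intro x hx
      have hbx := hgt1 x hx
      rw [List.count_cons, ← hbs, List.count_append]
      have : (bs.takeWhile (fun x => x = b)).count x = 0 := by
        apply List.count_eq_zero.mpr
        intro hmem
        exact absurd (hp2 x hmem) (ne_of_gt hbx)
      simp [this, (ne_of_gt hbx).symm]
    -- assemble
    have ihc := ih (hs.tail.sublist (List.dropWhile_sublist _))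
      (ht.tail.sublist (List.dropWhile_sublist _))
    rw [ihc]
    conv_rhs => rw [← has]
    rw [List.map_cons, List.map_append, List.sum_cons, List.sum_append]
    have hsum1 : ((as.takeWhile (fun x => x = b)).map (fun a => (b :: bs).count a)).sum
        = (as.takeWhile (fun x => x = b)).length * ((bs.takeWhile (fun x => x = b)).length + 1) := by
      have hconst : ∀ x ∈ as.takeWhile (fun x => x = b),
          (b :: bs).count x = (bs.takeWhile (fun x => x = b)).length + 1 :=
        fun x hx => by rw [hp1 x hx, hcb]
      rw [List.map_congr_left hconst, List.map_const', List.sum_replicate, smul_eq_mul]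
    have hsum2 : ((as.dropWhile (fun x => x = b)).map (fun a => (b :: bs).count a)).sum
        = ((as.dropWhile (fun x => x = b)).map
            (fun a => (bs.dropWhile (fun x => x = b)).count a)).sum := by
      apply congrArg List.sum
      exact List.map_congr_left hcr
    rw [hsum1, hsum2, hcb]
    ring

theorem pv_sum_count_perm (s s' t t' : List Char) (hs : s.Perm s') (ht : t.Perm t') :
    (s.map (fun a => t.count a)).sum = (s'.map (fun a => t'.count a)).sum := by
  rw [List.map_congr_left (fun a _ => ht.count_eq a)]
  exact (hs.map _).sum_eq

-- ===== VERDICT (by name: the statement is the Claim_ definition above) =====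
theorem count_trees_of_given_shape_spec : Claim_equal_count_trees_of_given_shape := by
  intro t vars fns _
  unfold Spec_count_trees_of_given_shape count_trees_of_given_shape count_trees_of_given_shape_alt
  have key : ∀ l : List Char,
      pvMerge (PySem.List.sorted l (fun x => x) false) (PySem.List.sorted t.toList (fun x => x) false)
        = (l.map (fun a => t.toList.count a)).sum := by
    intro l
    rw [pvMerge_eq_sum _ _ (PySem.List.sorted_pairwise l (fun x => x)) (PySem.List.sorted_pairwise t.toList (fun x => x))]
    exact pv_sum_count_perm _ _ _ _ (PySem.List.sorted_perm l (fun x => x) false) (PySem.List.sorted_perm t.toList (fun x => x) false)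
  simp only [key]
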